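-- pv_equiv track=rewrite | github.com/gabrielbianchin/bacharelado | TCC/ferramentaweb/ferramenta/codigo.py | carga
-- ===== SOURCE A (Python) =====
-- def carga(sequence):
-- 	soma = 0
-- 	for i in range(len(sequence)):
-- 		if sequence[i] == 'H' or sequence[i] == 'R' or sequence[i] == 'K':
-- 			soma += 1
-- 		if sequence[i] == 'E' or sequence[i] == 'D':
-- 			soma -= 1
-- 	return soma
-- ===== SOURCE B (Python) =====
-- def carga(sequence):
--     n = len(sequence)
--     if n == 0:
--         return 0
--     if n == 1:
--         c = sequence[0]
--         if c == 'H' or c == 'R' or c == 'K':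
--             return 1
--         if c == 'E' or c == 'D':
--             return -1
--         return 0
--     m = n // 2
--     return carga(sequence[:m]) + carga(sequence[m:])
-- ===== Notes on version B (the rewrite author's own statement) =====
-- stated objective: alternative
-- what changed: B computes the net charge by divide-and-conquer recursion (split the sequence in half, recurse on both halves, add the two charges; base cases empty and single character), replacing A's single iterative index loop with an accumulator.
import Mathlib
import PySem

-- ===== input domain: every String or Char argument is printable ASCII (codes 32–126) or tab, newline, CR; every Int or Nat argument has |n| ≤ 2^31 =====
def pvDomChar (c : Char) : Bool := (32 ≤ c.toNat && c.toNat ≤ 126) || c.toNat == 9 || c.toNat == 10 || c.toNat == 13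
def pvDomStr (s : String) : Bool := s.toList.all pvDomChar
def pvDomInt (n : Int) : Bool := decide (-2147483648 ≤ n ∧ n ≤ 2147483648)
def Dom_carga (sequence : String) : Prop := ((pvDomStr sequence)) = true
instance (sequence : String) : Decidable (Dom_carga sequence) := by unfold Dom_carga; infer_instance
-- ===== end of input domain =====

-- B replaces A's single accumulator loop by divide-and-conquer recursion (split in half, recurse, add); alternative decomposition, no speed claim.


-- ===== PORT A =====
-- Literal port of A: loop over indices via pyRange, same two independent ifs, accumulator soma.
def cargaStep (sequence : String) (soma : Int) (i : Int) : Int :=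
  let c := (PySem.Str.pyGet? sequence i).getD 'A'  -- index always in range; default never used
  let soma := if c = 'H' ∨ c = 'R' ∨ c = 'K' then soma + 1 else soma
  if c = 'E' ∨ c = 'D' then soma - 1 else soma

def carga (sequence : String) : Int :=
  (PySem.List.pyRange 0 (PySem.Str.len sequence) 1).foldl (cargaStep sequence) 0

-- ===== PORT B =====
-- Port of B, working on the character list: base cases for length 0 and 1,
-- otherwise split at m = n // 2 (Python s[:m] / s[m:] = take m / drop m, exact for 0 ≤ m ≤ n) and recurse.
-- The fuel argument is only a structural totality guard (fuel ≥ length always holds at the call).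
def cargaAltGo : Nat → List Char → Int
  | 0, _ => 0
  | fuel + 1, l =>
    if l.length = 0 then 0
    else if l.length = 1 then
      let c := (PySem.List.pyGet? l 0).getD ' '  -- index 0 in range since length = 1
      if c = 'H' ∨ c = 'R' ∨ c = 'K' then 1
      else if c = 'E' ∨ c = 'D' then -1
      else 0
    else
      let m := l.length / 2
      cargaAltGo fuel (l.take m) + cargaAltGo fuel (l.drop m)

def carga_alt (sequence : String) : Int := cargaAltGo sequence.toList.length sequence.toList

-- ===== PRECONDITION & SPEC =====
def Spec_carga (sequence : String) (out : Int) : Prop := out = carga_alt sequence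
instance (sequence : String) (out : Int) : Decidable (Spec_carga sequence out) := by unfold Spec_carga; infer_instance

-- ===== CLAIM (what is proved, stated in full; the proofs are below) =====
def Claim_equal_carga : Prop := ∀ (sequence : String), Dom_carga sequence → Spec_carga sequence (carga sequence)

-- ===== LEMMAS AND PROOFS =====

-- The common yardstick: net count of charged residues in a character list.
def netCount (l : List Char) : Int :=
  ((l.count 'H' : Int) + l.count 'R' + l.count 'K') - ((l.count 'E' : Int) + l.count 'D')

-- Indexing loop 'for i in range(len l)' over pyGet? equals a structural fold over the list.
lemma foldl_pyRange_pyGet (g : Int → Char → Int) (l : List Char) (a : Int) :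
    (PySem.List.pyRange 0 (l.length : Int) 1).foldl
      (fun soma i => g soma ((PySem.List.pyGet? l i).getD 'A')) a
    = l.foldl g a := by
  induction l using List.reverseRecOn generalizing a with
  | nil => simp [PySem.List.pyRange_one_eq_nil]
  | append_singleton xs x ih =>
      have hlen : ((xs ++ [x]).length : Int) = (xs.length : Int) + 1 := by
        simp
      rw [hlen, PySem.List.pyRange_one_succ_right (by positivity), List.foldl_append]
      have hcongr :
          (PySem.List.pyRange 0 (xs.length : Int) 1).foldl
            (fun soma i => g soma ((PySem.List.pyGet? (xs ++ [x]) i).getD 'A')) a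
          = (PySem.List.pyRange 0 (xs.length : Int) 1).foldl
            (fun soma i => g soma ((PySem.List.pyGet? xs i).getD 'A')) a := by
        refine PySem.List.foldl_congr_mem _ _ _ _ ?_
        intro acc i hi
        have hmem := (PySem.List.mem_pyRange_one.mp hi)
        have h0 : 0 ≤ i := hmem.1
        have hlt : i < (xs.length : Int) := hmem.2
        rw [PySem.List.pyGet?_of_nonneg _ h0, PySem.List.pyGet?_of_nonneg _ h0,
          List.getElem?_append_left (by omega)]
      rw [hcongr, ih]
      simp

-- A's loop over indices equals a fold over the character list.
lemma carga_over_list (s : String) :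
    carga s = s.toList.foldl (fun soma c =>
      let soma := if c = 'H' ∨ c = 'R' ∨ c = 'K' then soma + 1 else soma
      if c = 'E' ∨ c = 'D' then soma - 1 else soma) 0 := by
  unfold carga cargaStep
  rw [PySem.Str.len_eq]
  have hbridge : ∀ i, PySem.Str.pyGet? s i = PySem.List.pyGet? s.toList i := fun _ => rfl
  simp only [hbridge]
  exact foldl_pyRange_pyGet
    (fun soma c =>
      let soma := if c = 'H' ∨ c = 'R' ∨ c = 'K' then soma + 1 else soma
      if c = 'E' ∨ c = 'D' then soma - 1 else soma) s.toList 0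

lemma fold_counts (l : List Char) (a : Int) :
    l.foldl (fun soma c =>
      let soma := if c = 'H' ∨ c = 'R' ∨ c = 'K' then soma + 1 else soma
      if c = 'E' ∨ c = 'D' then soma - 1 else soma) a
    = a + netCount l := by
  induction l generalizing a with
  | nil => simp [netCount]
  | cons x xs ih =>
      simp only [List.foldl_cons, ih, netCount, List.count_cons]
      by_cases hH : x = 'H' <;> by_cases hR : x = 'R' <;> by_cases hK : x = 'K' <;>
        by_cases hE : x = 'E' <;> by_cases hD : x = 'D' <;>
        simp_all <;> ring

lemma netCount_append (l₁ l₂ : List Char) :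
    netCount (l₁ ++ l₂) = netCount l₁ + netCount l₂ := by
  simp [netCount, List.count_append]; ring

lemma cargaAltGo_eq_netCount (fuel : Nat) :
    ∀ l : List Char, l.length ≤ fuel → cargaAltGo fuel l = netCount l := by
  induction fuel with
  | zero =>
      intro l hl
      obtain rfl := List.length_eq_zero_iff.mp (Nat.le_zero.mp hl)
      simp [cargaAltGo, netCount]
  | succ fuel ih =>
      intro l hl
      rw [cargaAltGo]
      by_cases h0 : l.length = 0
      · rw [if_pos h0]
        obtain rfl := List.length_eq_zero_iff.mp h0
        simp [netCount]
      · rw [if_neg h0]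
        by_cases h1 : l.length = 1
        · rw [if_pos h1]
          obtain ⟨c, rfl⟩ := List.length_eq_one_iff.mp h1
          simp only [PySem.List.pyGet?, PySem.List.pyIdx?]
          by_cases hH : c = 'H' <;> by_cases hR : c = 'R' <;> by_cases hK : c = 'K' <;>
            by_cases hE : c = 'E' <;> by_cases hD : c = 'D' <;>
            simp_all [netCount]
        · rw [if_neg h1]
          show cargaAltGo fuel (List.take (l.length / 2) l) + cargaAltGo fuel (List.drop (l.length / 2) l)
            = netCount l
          rw [ih _ (by simp; omega), ih _ (by simp; omega),
            ← netCount_append, List.take_append_drop]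

lemma carga_eq_alt (s : String) : carga s = carga_alt s := by
  rw [carga_over_list, fold_counts, carga_alt, cargaAltGo_eq_netCount _ _ le_rfl]
  simp

-- ===== VERDICT (by name: the statement is the Claim_ definition above) =====
theorem carga_spec : Claim_equal_carga := by
  intro s _
  unfold Spec_carga
  exact carga_eq_alt s
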